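-- pv_equiv track=rewrite | github.com/heyhenry/python-problemsolving | 2023/June_2023/120623/pset_02/max_even_table.py | max_even_table
-- ===== SOURCE A (Python) =====
-- def max_even_table(lst : list[list[int]]) -> list[int | None]:
--
--     result = []
--     # calc_list = []
--     max_num = None
--
--     for row in lst:
--         temp_list = []
--         for i in row:
--             if i % 2 == 0:
--                 temp_list.append(i)
--         if temp_list:
--             max_num = max(temp_list)
--             result.append(max_num)
--         elif len(temp_list) == 0:
--             max_num = None
--             # reason behind reiterating the None value is based on the python tutor displaying that the max_num is actually
--             # being updated while the final if statements are being processed and never gets referred back to its original value before the for loop,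
--             # therefore we need to 'remind' or re-assign the None value based on the desired situational outcome
--             result.append(max_num)
--
--     return result
-- ===== SOURCE B (Python) =====
-- def max_even_table(lst):
--     result = []
--     for row in lst:
--         best = None
--         for i in row:
--             if i % 2 == 0 and (best is None or i > best):
--                 best = i
--         result.append(best)
--     return result
-- ===== Notes on version B (the rewrite author's own statement) =====
-- stated objective: simpler
-- what changed: Replaced the per-row filter-into-a-temp-list followed by library max with a single-pass running-max accumulator (best starts at None, updated on each even element), building no intermediate list.
import Mathlib
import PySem

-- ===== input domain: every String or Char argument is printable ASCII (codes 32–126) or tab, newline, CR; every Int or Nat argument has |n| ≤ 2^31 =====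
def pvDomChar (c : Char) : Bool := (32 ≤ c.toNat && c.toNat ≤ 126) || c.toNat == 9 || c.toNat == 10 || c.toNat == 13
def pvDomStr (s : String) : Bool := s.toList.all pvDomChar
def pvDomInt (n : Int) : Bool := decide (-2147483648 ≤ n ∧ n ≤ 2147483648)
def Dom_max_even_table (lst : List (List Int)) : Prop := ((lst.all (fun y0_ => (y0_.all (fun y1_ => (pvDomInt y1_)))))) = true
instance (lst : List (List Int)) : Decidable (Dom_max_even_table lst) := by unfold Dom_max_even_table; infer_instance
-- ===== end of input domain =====

-- B replaces A's per-row build-a-list-of-evens-then-max with a single-pass running-max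
-- accumulator (simpler: no intermediate list, no library max); same return value on every input.

-- ===== PORT A =====
-- literal port of A: per row, build temp_list of evens, then append max(temp_list) or None;
-- max_num is threaded as dead state exactly as in A.
def max_even_table (lst : List (List Int)) : List (Option Int) :=
  (lst.foldl (fun (st : List (Option Int) × Option Int) row =>
    let temp_list := row.foldl (fun t i => if PySem.Int.mod i 2 == 0 then t ++ [i] else t) []
    if temp_list ≠ [] then
      match PySem.List.max? temp_list (fun y => y) with
      | some m => (st.1 ++ [some m], some m)
      | none => st   -- unreachable: temp_list ≠ []
    else if temp_list.length = 0 then (st.1 ++ [(none : Option Int)], none)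
    else st) ([], none)).1

-- ===== PORT B =====
-- port of B: single-pass running max per row, no intermediate list.
-- pvStepB is the body of B's inner loop: 'if i % 2 == 0 and (best is None or i > best): best = i'
def pvStepB (best : Option Int) (i : Int) : Option Int :=
  if PySem.Int.mod i 2 == 0 then
    match best with
    | none => some i
    | some b => if b < i then some i else best
  else best

def max_even_table_alt (lst : List (List Int)) : List (Option Int) :=
  lst.foldl (fun res row => res ++ [row.foldl pvStepB none]) []

-- ===== PRECONDITION & SPEC =====
def Spec_max_even_table (lst : List (List Int)) (out : List (Option Int)) : Prop := out = max_even_table_alt lst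
instance (lst : List (List Int)) (out : List (Option Int)) : Decidable (Spec_max_even_table lst out) := by unfold Spec_max_even_table; infer_instance

-- ===== CLAIM (what is proved, stated in full; the proofs are below) =====
def Claim_equal_max_even_table : Prop := ∀ (lst : List (List Int)), Dom_max_even_table lst → Spec_max_even_table lst (max_even_table lst)

-- ===== LEMMAS AND PROOFS =====

-- ===== VERDICT (by name: the statement is the Claim_ definition above) =====
def pvEven (i : Int) : Bool := PySem.Int.mod i 2 == 0

theorem foldB_some (row : List Int) (b : Int) :
    row.foldl pvStepB (some b) = some ((row.filter pvEven).foldl max b) := by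
  induction row generalizing b with
  | nil => rfl
  | cons i t ih =>
    simp only [List.foldl_cons, List.filter_cons]
    by_cases h : pvEven i = true
    · have hs : pvStepB (some b) i = some (max b i) := by
        simp only [pvStepB]
        rw [if_pos (by simpa [pvEven] using h)]
        congr 1
        rcases lt_or_ge b i with hlt | hge
        · rw [if_pos hlt, max_eq_right hlt.le]
        · rw [if_neg (not_lt.mpr hge), max_eq_left hge]
      rw [hs, ih, h]
      simp
    · have hs : pvStepB (some b) i = some b := by
        simp only [pvStepB]
        rw [if_neg (by simpa [pvEven] using h)]
      rw [hs, ih]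
      simp [h]

theorem foldB_eq_max? (row : List Int) :
    row.foldl pvStepB none = PySem.List.max? (row.filter pvEven) (fun y => y) := by
  induction row with
  | nil => rfl
  | cons i t ih =>
    simp only [List.foldl_cons, List.filter_cons]
    by_cases h : pvEven i = true
    · have hs : pvStepB none i = some i := by
        simp only [pvStepB]
        rw [if_pos (by simpa [pvEven] using h)]
      rw [hs, foldB_some, h]
      simp [PySem.List.max?_id_cons]
    · have hs : pvStepB none i = none := by
        simp only [pvStepB]
        rw [if_neg (by simpa [pvEven] using h)]
      rw [hs, ih]
      simp [h]

theorem foldA_eq (lst : List (List Int)) (res : List (Option Int)) (mn : Option Int) :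
    (lst.foldl (fun (st : List (Option Int) × Option Int) row =>
      let temp_list := row.foldl (fun t i => if PySem.Int.mod i 2 == 0 then t ++ [i] else t) []
      if temp_list ≠ [] then
        match PySem.List.max? temp_list (fun y => y) with
        | some m => (st.1 ++ [some m], some m)
        | none => st
      else if temp_list.length = 0 then (st.1 ++ [(none : Option Int)], none)
      else st) (res, mn)).1
    = res ++ lst.map (fun row => row.foldl pvStepB none) := by
  induction lst generalizing res mn with
  | nil => simp
  | cons row t ih =>
    have htemp : row.foldl (fun t i => if PySem.Int.mod i 2 == 0 then t ++ [i] else t) []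
        = row.filter pvEven := by
      simpa [pvEven] using
        (PySem.List.foldl_append_if_eq_filter (l := row) (p := pvEven) (acc := []))
    simp only [List.foldl_cons, List.map_cons]
    rw [htemp]
    by_cases hf : row.filter pvEven = []
    · rw [if_neg (by simp [hf]), if_pos (by simp [hf]), ih, foldB_eq_max?, hf]
      simp [PySem.List.max?]
    · have : ∃ m, PySem.List.max? (row.filter pvEven) (fun y => y) = some m := by
        rcases List.exists_cons_of_ne_nil hf with ⟨x, xs, hx⟩
        exact ⟨_, by rw [hx, PySem.List.max?_id_cons]⟩
      rcases this with ⟨m, hm⟩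
      rw [if_pos hf, hm, ih, foldB_eq_max?, hm]
      simp

-- ===== VERDICT =====
theorem max_even_table_spec : Claim_equal_max_even_table := by
  intro lst _
  unfold Spec_max_even_table max_even_table max_even_table_alt
  rw [foldA_eq, PySem.List.foldl_append_singleton_eq_map]
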